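-- pv_equiv track=rewrite | github.com/PatrykWolny1/poker-django | classes/Croupier.py | remove_all_but_one
-- ===== SOURCE A (Python) =====
-- def remove_all_but_one(lst, value):
--     count = 0
--     result = []
--     for item in lst:
--         if item == value:
--             count += 1
--             if count == 1:
--                 result.append(item)
--         else:
--             result.append(item)
--     return result
-- ===== SOURCE B (Python) =====
-- def remove_all_but_one(lst, value):
--     result = [x for x in lst if x != value]
--     if value in lst:
--         result.insert(lst.index(value), value)
--     return result
-- ===== Notes on version B (the rewrite author's own statement) =====
-- stated objective: simpler
-- what changed: Replaces the counting loop with a filter comprehension plus a single positional reinsertion of the first occurrence via lst.index.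
import Mathlib
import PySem

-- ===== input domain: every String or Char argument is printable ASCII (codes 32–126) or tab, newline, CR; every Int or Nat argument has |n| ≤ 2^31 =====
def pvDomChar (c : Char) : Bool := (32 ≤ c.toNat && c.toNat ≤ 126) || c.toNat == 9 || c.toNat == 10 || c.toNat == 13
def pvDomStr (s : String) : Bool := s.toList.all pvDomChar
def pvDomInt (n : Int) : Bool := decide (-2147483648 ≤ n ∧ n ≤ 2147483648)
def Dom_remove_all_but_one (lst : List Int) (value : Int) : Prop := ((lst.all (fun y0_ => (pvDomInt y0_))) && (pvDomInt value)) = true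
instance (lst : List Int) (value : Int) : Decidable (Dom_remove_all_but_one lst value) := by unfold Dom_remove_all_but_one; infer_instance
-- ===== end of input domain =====

-- B replaces A's counting loop by a filter pass plus one positional reinsertion (simpler decomposition).

-- ===== PORT A =====
-- literal port of A's single loop over (count, result)
def remove_all_but_one (lst : List Int) (value : Int) : List Int :=
  (lst.foldl
    (fun (s : Nat × List Int) item =>
      if item = value then
        let count := s.1 + 1
        (count, if count = 1 then s.2 ++ [item] else s.2)
      else
        (s.1, s.2 ++ [item]))
    (0, [])).2

-- ===== PORT B =====
-- literal port of Source B: filter comprehension, then insert value at lst.index(value) if present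
def remove_all_but_one_alt (lst : List Int) (value : Int) : List Int :=
  let result := lst.filter (fun x => x != value)
  if value ∈ lst then
    PySem.List.insert result (((PySem.List.index? lst value).getD 0 : Nat) : Int) value
  else
    result

-- ===== PRECONDITION & SPEC =====
def Spec_remove_all_but_one (lst : List Int) (value : Int) (out : List Int) : Prop := out = remove_all_but_one_alt lst value
instance (lst : List Int) (value : Int) (out : List Int) : Decidable (Spec_remove_all_but_one lst value out) := by unfold Spec_remove_all_but_one; infer_instance

-- ===== CLAIM (what is proved, stated in full; the proofs are below) =====
def Claim_equal_remove_all_but_one : Prop := ∀ (lst : List Int) (value : Int), Dom_remove_all_but_one lst value → Spec_remove_all_but_one lst value (remove_all_but_one lst value)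

-- ===== LEMMAS AND PROOFS =====

-- A's loop body as a named function (definitionally equal to the lambda in the port)
def stepA (v : Int) (s : Nat × List Int) (item : Int) : Nat × List Int :=
  if item = v then
    let count := s.1 + 1
    (count, if count = 1 then s.2 ++ [item] else s.2)
  else
    (s.1, s.2 ++ [item])

lemma remove_eq_foldl_stepA (lst : List Int) (v : Int) :
    remove_all_but_one lst v = (lst.foldl (stepA v) (0, [])).2 := rfl

-- result component of A's loop, as a structural recursion parameterised by the running count
def remKeep (v : Int) (c : Nat) : List Int → List Int
  | [] => []
  | x :: xs =>
      if x = v then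
        if c + 1 = 1 then x :: remKeep v (c + 1) xs else remKeep v (c + 1) xs
      else
        x :: remKeep v c xs

lemma foldA_eq_remKeep (v : Int) : ∀ (lst : List Int) (c : Nat) (acc : List Int),
    (lst.foldl (stepA v) (c, acc)).2 = acc ++ remKeep v c lst := by
  intro lst
  induction lst with
  | nil => intro c acc; simp [remKeep]
  | cons x xs ih =>
      intro c acc
      rw [List.foldl_cons]
      by_cases hx : x = v
      · subst hx
        by_cases hc : c + 1 = 1
        · have hs : stepA x (c, acc) x = (c + 1, acc ++ [x]) := by
            simp [stepA, hc]
          rw [hs, ih, remKeep, if_pos rfl, if_pos hc]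
          simp
        · have hs : stepA x (c, acc) x = (c + 1, acc) := by
            simp [stepA]; omega
          rw [hs, ih, remKeep, if_pos rfl, if_neg hc]
      · have hs : stepA v (c, acc) x = (c, acc ++ [x]) := by
          simp [stepA, hx]
        rw [hs, ih, remKeep, if_neg hx]
        simp

lemma remKeep_pos (v : Int) : ∀ (lst : List Int) (c : Nat), c ≠ 0 →
    remKeep v c lst = lst.filter (fun x => x != v) := by
  intro lst
  induction lst with
  | nil => intro c _; simp [remKeep]
  | cons x xs ih =>
      intro c hc
      by_cases hx : x = v
      · subst hx
        have h1 : ¬ (c + 1 = 1) := by omega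
        rw [remKeep, if_pos rfl, if_neg h1, ih (c + 1) (by omega)]
        simp
      · rw [remKeep, if_neg hx, ih c hc]
        simp [bne_iff_ne, hx]

lemma filter_of_not_mem (v : Int) (l : List Int) (h : v ∉ l) :
    l.filter (fun x => x != v) = l := by
  apply List.filter_eq_self.mpr
  intro a ha
  simp only [bne_iff_ne, ne_eq]
  exact fun hav => h (hav ▸ ha)

lemma remKeep_zero_eq_alt (v : Int) : ∀ (lst : List Int),
    remKeep v 0 lst = remove_all_but_one_alt lst v := by
  intro lst
  induction lst with
  | nil => simp [remKeep, remove_all_but_one_alt]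
  | cons x xs ih =>
      by_cases hx : x = v
      · subst hx
        have h1 : remKeep x 1 xs = xs.filter (fun y => y != x) := remKeep_pos x xs 1 (by omega)
        rw [remKeep, if_pos rfl, if_pos rfl, h1]
        unfold remove_all_but_one_alt
        rw [if_pos (List.mem_cons_self), PySem.List.index?_cons_self]
        rw [List.filter_cons_of_neg (by simp)]
        simp [PySem.List.insert_zero]
      · have hxne : v ≠ x := fun h => hx h.symm
        have hfc : (x :: xs).filter (fun y => y != v) = x :: xs.filter (fun y => y != v) :=
          List.filter_cons_of_pos (by simp [bne_iff_ne, hx])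
        rw [remKeep, if_neg hx, ih]
        by_cases hm : v ∈ xs
        · obtain ⟨i, hi⟩ := Option.isSome_iff_exists.mp
            ((PySem.List.index?_isSome_iff xs v).mpr hm)
          obtain ⟨pre, suf, hxs, hlen, hpre⟩ := (PySem.List.index?_eq_some_iff xs v i).mp hi
          have hle : i ≤ (xs.filter (fun y => y != v)).length := by
            rw [hxs, List.filter_append, filter_of_not_mem v pre hpre,
                List.length_append, ← hlen]
            omega
          have hcons : PySem.List.index? (x :: xs) v = some (i + 1) := by
            rw [PySem.List.index?_cons_of_ne xs hx, hi]; rfl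
          unfold remove_all_but_one_alt
          rw [if_pos (List.mem_cons_of_mem x hm), if_pos hm, hi, hcons]
          simp only [Option.getD_some]
          rw [hfc,
              PySem.List.insert_natCast _ i v hle,
              PySem.List.insert_natCast _ (i + 1) v (by simp; omega)]
          simp
        · have hnm : v ∉ x :: xs := by
            intro h; rcases List.mem_cons.mp h with h | h
            · exact hxne h
            · exact hm h
          unfold remove_all_but_one_alt
          rw [if_neg hnm, if_neg hm, hfc]

-- ===== VERDICT (by name: the statement is the Claim_ definition above) =====
theorem remove_all_but_one_spec : Claim_equal_remove_all_but_one := by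
  intro lst value _
  unfold Spec_remove_all_but_one
  rw [remove_eq_foldl_stepA, foldA_eq_remKeep value lst 0 []]
  simpa using remKeep_zero_eq_alt value lst
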